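-- pv_equiv track=rewrite | github.com/KULeuven-MICAS/hypercorex | hdc_exp/hdc_util.py | pack_ld_to_hd
-- ===== SOURCE A (Python) =====
-- import math
--
-- def pack_ld_to_hd(data, ld_dim, hd_dim):
--     num_per_chunk = hd_dim // ld_dim
--     num_features = len(data)
--     math.ceil(num_features / num_per_chunk)
--
--     new_data = []
--     for i in range(0, num_features, num_per_chunk):
--         packed_num = 0
--         for j in range(num_per_chunk):
--             if i + j < num_features:
--                 value = data[i + j]
--             else:
--                 value = 0  # pad with 0
--             packed_num += value << (j * ld_dim)
--         new_data.append(packed_num)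
--     return new_data
-- ===== SOURCE B (Python) =====
-- def pack_ld_to_hd(data, ld_dim, hd_dim):
--     num_per_chunk = hd_dim // ld_dim
--     new_data = []
--     for i in range(0, len(data), num_per_chunk):
--         packed = 0
--         for v in reversed(data[i:i + num_per_chunk]):
--             packed = (packed << ld_dim) + v
--         new_data.append(packed)
--     return new_data
-- ===== Notes on version B (the rewrite author's own statement) =====
-- stated objective: simpler
-- what changed: Replaces the inner j-indexed loop with its padding branch and positional shift value << (j*ld_dim) by a Horner-style shift-and-add fold over the reversed slice data[i:i+num_per_chunk] (missing trailing elements contribute zero), and drops the dead math.ceil line; Pre_ excludes inputs where A raises (ld_dim==0 or hd_dim//ld_dim==0: ZeroDivisionError; …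
-- outside the precondition, e.g. on pack_ld_to_hd([3, 4], -2, -3): A returns [3, 4], B raises ValueError
import Mathlib
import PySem

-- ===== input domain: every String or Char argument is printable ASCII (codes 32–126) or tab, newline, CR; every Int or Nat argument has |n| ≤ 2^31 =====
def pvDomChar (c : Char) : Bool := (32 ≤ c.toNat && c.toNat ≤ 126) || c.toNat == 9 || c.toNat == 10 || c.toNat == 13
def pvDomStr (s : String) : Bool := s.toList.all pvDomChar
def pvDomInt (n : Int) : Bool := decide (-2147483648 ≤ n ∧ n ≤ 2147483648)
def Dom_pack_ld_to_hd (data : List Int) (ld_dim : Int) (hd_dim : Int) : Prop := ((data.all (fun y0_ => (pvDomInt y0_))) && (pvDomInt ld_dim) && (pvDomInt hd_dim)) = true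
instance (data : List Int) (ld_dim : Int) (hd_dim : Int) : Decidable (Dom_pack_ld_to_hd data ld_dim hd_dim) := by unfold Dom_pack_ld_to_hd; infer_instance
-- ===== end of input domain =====

-- B replaces A's j-indexed inner loop (padding branch, positional shift by j*ld_dim) by a
-- Horner-style shift-and-add fold over the reversed slice; same results, no speed claim.

-- ===== PORT A =====
-- Python's 'value << (j * ld_dim)' raises on a negative shift count; Pre_ below confines the
-- claim to inputs where every executed shift count is nonnegative, so '.toNat' is exact there.
-- 'data[i + j]' is executed only under the guard 'i + j < num_features' with i, j ≥ 0, so it is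
-- always in range there; pyGetD with default 0 is exact on those indices.
def pack_ld_to_hd (data : List Int) (ld_dim : Int) (hd_dim : Int) : List Int :=
  let num_per_chunk := PySem.Int.floordiv hd_dim ld_dim
  let num_features : Int := (data.length : Int)
  -- A's 'math.ceil(num_features / num_per_chunk)' is dead code; its ZeroDivisionError when
  -- num_per_chunk = 0 is excluded by Pre_ below.
  (PySem.List.pyRange 0 num_features num_per_chunk).foldl
    (fun new_data i =>
      let packed_num :=
        (PySem.List.pyRange 0 num_per_chunk 1).foldl
          (fun packed_num j =>
            let value := if i + j < num_features then PySem.List.pyGetD data (i + j) 0 else 0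
            packed_num + (value <<< ((j * ld_dim).toNat)))
          0
      new_data ++ [packed_num])
    []

-- ===== PORT B =====
-- 'packed << ld_dim' raises for negative ld_dim whenever the fold body runs; Pre_ excludes that.
def pack_ld_to_hd_alt (data : List Int) (ld_dim : Int) (hd_dim : Int) : List Int :=
  let num_per_chunk := PySem.Int.floordiv hd_dim ld_dim
  (PySem.List.pyRange 0 (data.length : Int) num_per_chunk).foldl
    (fun new_data i =>
      let chunk := PySem.List.slice data (some i) (some (i + num_per_chunk))
      let packed := chunk.reverse.foldl (fun (p : Int) (v : Int) => (p <<< ld_dim.toNat) + v) (0 : Int)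
      new_data ++ [packed])
    []

-- ===== PRECONDITION & SPEC =====
-- Pre_ excludes inputs where Python A raises (ld_dim = 0 or hd_dim // ld_dim = 0:
-- ZeroDivisionError; ld_dim < 0 with chunk size ≥ 2 and nonempty data: negative-shift
-- ValueError) and the accidental corner ld_dim < 0 with chunk size exactly 1 and nonempty
-- data, where A returns the data unchanged via its lone j = 0 zero shift while B's natural
-- Horner shift raises ValueError.
def Pre_pack_ld_to_hd (data : List Int) (ld_dim : Int) (hd_dim : Int) : Prop :=
  ld_dim ≠ 0 ∧ PySem.Int.floordiv hd_dim ld_dim ≠ 0 ∧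
    (PySem.Int.floordiv hd_dim ld_dim < 0 ∨ 0 < ld_dim ∨ data = [])

instance (data : List Int) (ld_dim : Int) (hd_dim : Int) : Decidable (Pre_pack_ld_to_hd data ld_dim hd_dim) := by
  unfold Pre_pack_ld_to_hd; infer_instance

def pvWitness_pack_ld_to_hd : List Int × Int × Int := ([1, 2, 3], 2, 8)

def Spec_pack_ld_to_hd (data : List Int) (ld_dim : Int) (hd_dim : Int) (out : List Int) : Prop := out = pack_ld_to_hd_alt data ld_dim hd_dim
instance (data : List Int) (ld_dim : Int) (hd_dim : Int) (out : List Int) : Decidable (Spec_pack_ld_to_hd data ld_dim hd_dim out) := by unfold Spec_pack_ld_to_hd; infer_instance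

-- ===== CLAIM (what is proved, stated in full; the proofs are below) =====
def Claim_equal_pack_ld_to_hd : Prop := ∀ (data : List Int) (ld_dim : Int) (hd_dim : Int), Dom_pack_ld_to_hd data ld_dim hd_dim → Pre_pack_ld_to_hd data ld_dim hd_dim → Spec_pack_ld_to_hd data ld_dim hd_dim (pack_ld_to_hd data ld_dim hd_dim)

-- ===== LEMMAS AND PROOFS =====

-- range(0, b, s) is empty for a negative step and a nonnegative stop
theorem pyRange_neg_step_nil (b s : Int) (h : s < 0) (hb : 0 ≤ b) :
    PySem.List.pyRange 0 b s = [] := by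
  simp [PySem.List.pyRange, show ¬ (0:Int) < s by omega, show ¬ b < 0 by omega]

-- the padded positional sum Σ_{k<nc} xs.getD k 0 * c^k equals the Horner foldr over xs.take nc
theorem sum_range_getD_eq_horner (nc : Nat) (xs : List Int) (c : Int) :
    ((List.range nc).map (fun k => xs.getD k 0 * c ^ k)).sum
      = (xs.take nc).foldr (fun v p => p * c + v) 0 := by
  induction nc generalizing xs with
  | zero => simp
  | succ n ih =>
    cases xs with
    | nil => simp
    | cons v t =>
      rw [List.range_succ_eq_map]
      simp only [List.map_cons, List.map_map, List.sum_cons, List.take_succ_cons,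
        List.foldr_cons, Function.comp_def, List.getD_cons_succ, List.getD_cons_zero, pow_zero,
        pow_succ]
      rw [← ih t, ← List.sum_map_mul_right]
      have hm : (List.range n).map (fun k => t.getD k 0 * (c ^ k * c))
          = (List.range n).map (fun k => t.getD k 0 * c ^ k * c) :=
        List.map_congr_left fun k _ => by ring
      rw [hm]
      ring

-- A's padded value at offset k is exactly the getD-with-default of the dropped list
theorem val_eq_getD_drop (data : List Int) (i : Int) (k : Nat) (hi : 0 ≤ i) :
    (if i + (k : Int) < (data.length : Int) then PySem.List.pyGetD data (i + (k : Int)) 0 else 0)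
      = (data.drop i.toNat).getD k 0 := by
  by_cases h : i + (k : Int) < (data.length : Int)
  · have hk : i.toNat + k < data.length := by omega
    rw [if_pos h, PySem.List.pyGetD_eq_getElem data 0 (by omega) h]
    rw [List.getD_eq_getElem?_getD, List.getElem?_drop, List.getElem?_eq_getElem hk]
    simp only [Option.getD_some]
    congr 1
    omega
  · rw [if_neg h, List.getD_eq_getElem?_getD, List.getElem?_drop]
    rw [List.getElem?_eq_none (by omega)]
    rfl

-- per-chunk equality: A's positional-shift inner loop = B's Horner fold over the slice
theorem inner_eq (data : List Int) (ld npc i : Int)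
    (hld : 0 < ld) (hnpc : 0 < npc) (hi : 0 ≤ i) :
    (PySem.List.pyRange 0 npc 1).foldl
        (fun packed_num j =>
          packed_num + ((if i + j < (data.length : Int) then PySem.List.pyGetD data (i + j) 0 else 0)
            <<< ((j * ld).toNat))) 0
      = (PySem.List.slice data (some i) (some (i + npc))).reverse.foldl
          (fun (p : Int) (v : Int) => (p <<< ld.toNat) + v) (0 : Int) := by
  -- right side: slice → take/drop, reversed foldl → foldr, shift → multiplication
  have hslice : PySem.List.slice data (some i) (some (i + npc))
      = (data.drop i.toNat).take npc.toNat := by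
    rw [PySem.List.slice_toNat data hi (by omega)]
    congr 1
    omega
  rw [hslice, List.foldl_reverse]
  -- left side: range fold → sum over List.range
  have h1 : PySem.List.pyRange 0 npc 1 = (List.range npc.toNat).map (fun (k : Nat) => (k : Int)) :=
    PySem.List.pyRange_zero npc
  rw [h1, List.foldl_map, PySem.List.foldl_add, zero_add]
  have h2 : ∀ k ∈ List.range npc.toNat,
      ((if i + (k : Int) < (data.length : Int) then PySem.List.pyGetD data (i + (k : Int)) 0 else 0)
        <<< (((k : Int) * ld).toNat))
      = (data.drop i.toNat).getD k 0 * ((2:Int) ^ ld.toNat) ^ k := by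
    intro k _
    rw [Int.shiftLeft_eq, val_eq_getD_drop data i k hi]
    congr 1
    rw [Int.toNat_mul (by omega) (by omega), ← pow_mul, Int.toNat_natCast, mul_comm]
  rw [List.map_congr_left h2, sum_range_getD_eq_horner]
  have hb : (fun (v : Int) (p : Int) => (p <<< ld.toNat) + v)
      = (fun (v : Int) (p : Int) => p * (2:Int) ^ ld.toNat + v) := by
    funext v p
    rw [Int.shiftLeft_eq]
  rw [hb]

-- ===== VERDICT (by name: the statement is the Claim_ definition above) =====
theorem pack_ld_to_hd_spec : Claim_equal_pack_ld_to_hd := by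
  intro data ld hd _ hpre
  obtain ⟨hld0, hnpc0, hcase⟩ := hpre
  unfold Spec_pack_ld_to_hd pack_ld_to_hd pack_ld_to_hd_alt
  simp only []
  by_cases hneg : PySem.Int.floordiv hd ld < 0
  · rw [pyRange_neg_step_nil _ _ hneg (by positivity)]
    rfl
  · have hpos : 0 < PySem.Int.floordiv hd ld := by omega
    rcases hcase with h | h | h
    · exact absurd h hneg
    · -- main case: 0 < ld_dim and chunk size positive
      rw [PySem.List.foldl_append_singleton_eq_map, PySem.List.foldl_append_singleton_eq_map]
      refine congrArg _ (List.map_congr_left fun i hi => ?_)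
      have hi0 : 0 ≤ i := ((PySem.List.mem_pyRange_iff_of_pos hpos i).mp hi).1
      exact inner_eq data ld (PySem.Int.floordiv hd ld) i h hpos hi0
    · subst h
      simp [PySem.List.pyRange]
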